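-- pv_equiv track=rewrite | github.com/SS4G/Algorithm_exercise | leetcode/python_src/Leet468.py | validIPv4Part
-- ===== SOURCE A (Python) =====
-- def validIPv4Part(i):
--     for c in i:
--         if c not in "0123456789":
--             return False
--     if len(i) >= 4 or len(i) <= 0:
--         return False
--     if len(i) > 1 and i[0] == '0':
--         return False
--     else:
--         if 0 <= int(i) <= 255:
--             pass
--         else:
--             return False
--     return True
-- ===== SOURCE B (Python) =====
-- def validIPv4Part(i):
--     try:
--         n = int(i)
--     except ValueError:
--         return False
--     return str(n) == i and 0 <= n <= 255
-- ===== Notes on version B (the rewrite author's own statement) =====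
-- stated objective: idiomatic
-- what changed: Replaces the per-character digit loop and the separate length / leading-zero / range checks with parse-and-canonicalize: int(i) under try/except, then str(n) == i (which enforces digit-only spelling, nonempty, and no leading zero at once) and 0 <= n <= 255.
import Mathlib
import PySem

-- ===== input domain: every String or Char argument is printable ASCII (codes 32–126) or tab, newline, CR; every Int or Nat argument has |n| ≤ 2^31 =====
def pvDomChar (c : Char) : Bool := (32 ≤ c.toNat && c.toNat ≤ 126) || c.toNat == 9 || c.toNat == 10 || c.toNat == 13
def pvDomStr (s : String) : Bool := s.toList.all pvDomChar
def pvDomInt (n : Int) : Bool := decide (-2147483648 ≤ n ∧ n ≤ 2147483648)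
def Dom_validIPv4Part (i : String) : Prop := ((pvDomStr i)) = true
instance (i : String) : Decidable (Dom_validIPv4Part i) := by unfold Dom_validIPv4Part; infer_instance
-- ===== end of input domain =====

-- ===== PORT A =====
-- B replaces A's char loop + three separate checks by parse-and-canonicalize (str(int(i)) == i); objective: idiomatic/simpler.

-- the digit alphabet "0123456789" (membership 'c in "0123456789"' for a single char is list membership)
def pyDigits : List Char := "0123456789".toList

-- 'for c in i: if c not in "0123456789": return False' — early-return loop over the characters
def digitLoop : List Char → Bool
  | [] => true
  | c :: rest => if pyDigits.contains c then digitLoop rest else false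

def validIPv4PartCore (cs : List Char) : Bool :=
  if digitLoop cs = false then false
  else if 4 ≤ cs.length ∨ cs.length ≤ 0 then false
  else if 1 < cs.length ∧ PySem.List.pyGet? cs 0 = some '0' then false
  else match PySem.Int.ofChars? cs with
    | none => false   -- unreachable: all chars are digits and cs ≠ [], so int(i) cannot raise
    | some n => if 0 ≤ n ∧ n ≤ 255 then true else false

def validIPv4Part (i : String) : Bool := validIPv4PartCore i.toList

-- ===== PORT B =====
-- try: n = int(i) except ValueError: return False; return str(n) == i and 0 <= n <= 255
def validIPv4Part_alt (i : String) : Bool :=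
  match PySem.Int.ofStr? i with
  | none => false
  | some n => (PySem.Int.toStr n == i) && (decide (0 ≤ n) && decide (n ≤ 255))

-- ===== PRECONDITION & SPEC =====
def Spec_validIPv4Part (i : String) (out : Bool) : Prop := out = validIPv4Part_alt i
instance (i : String) (out : Bool) : Decidable (Spec_validIPv4Part i out) := by unfold Spec_validIPv4Part; infer_instance

-- ===== CLAIM (what is proved, stated in full; the proofs are below) =====
def Claim_equal_validIPv4Part : Prop := ∀ (i : String), Dom_validIPv4Part i → Spec_validIPv4Part i (validIPv4Part i)

-- ===== LEMMAS AND PROOFS =====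

-- B's computation at the List Char level
def altCore (cs : List Char) : Bool :=
  match PySem.Int.ofChars? cs with
  | none => false
  | some n => (PySem.Int.toChars n == cs) && (decide (0 ≤ n) && decide (n ≤ 255))

lemma alt_eq_altCore (i : String) : validIPv4Part_alt i = altCore i.toList := by
  unfold validIPv4Part_alt altCore
  have hof : PySem.Int.ofStr? i = PySem.Int.ofChars? i.toList := rfl
  rw [hof]
  cases PySem.Int.ofChars? i.toList with
  | none => rfl
  | some n =>
    have key : (PySem.Int.toStr n = i) ↔ (PySem.Int.toChars n = i.toList) := by
      constructor
      · intro h; rw [← h, PySem.Int.toList_toStr]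
      · intro h; apply String.toList_inj.mp; rw [PySem.Int.toList_toStr, h]
    have : (PySem.Int.toStr n == i) = (PySem.Int.toChars n == i.toList) := by
      rw [Bool.eq_iff_iff]; simp only [beq_iff_eq]; exact key
    dsimp only
    rw [this]

-- every canonical decimal spelling of 0..255 is all-digits and at most 3 chars long
set_option maxRecDepth 2000 in
lemma digits256 : ((List.range 256).all (fun m =>
    ((Nat.toDigits 10 m).all (fun c => pyDigits.contains c)) &&
    decide ((Nat.toDigits 10 m).length ≤ 3))) = true := by decide

lemma digitLoop_cons {c : Char} {r : List Char} (h : digitLoop (c :: r) = true) :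
    pyDigits.contains c = true ∧ digitLoop r = true := by
  by_cases hc : pyDigits.contains c = true
  · refine ⟨hc, ?_⟩; unfold digitLoop at h; rwa [if_pos hc] at h
  · unfold digitLoop at h; rw [if_neg hc] at h; cases h

lemma digitLoop_of_all {cs : List Char} (h : cs.all (fun c => pyDigits.contains c) = true) :
    digitLoop cs = true := by
  induction cs with
  | nil => rfl
  | cons c r ih =>
    rw [List.all_cons, Bool.and_eq_true] at h
    unfold digitLoop; rw [if_pos h.1]; exact ih h.2

-- if B accepts (or even just parses to a canonical in-range value), cs is the digit string of some m < 256
lemma altCore_true {cs : List Char} (h : altCore cs = true) :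
    ∃ m : Nat, m < 256 ∧ cs = Nat.toDigits 10 m := by
  unfold altCore at h
  cases hof : PySem.Int.ofChars? cs with
  | none => rw [hof] at h; cases h
  | some n =>
    rw [hof] at h
    simp only [Bool.and_eq_true, beq_iff_eq, decide_eq_true_eq] at h
    obtain ⟨h1, h2, h3⟩ := h
    refine ⟨n.toNat, by omega, ?_⟩
    rw [← h1]
    unfold PySem.Int.toChars
    rw [if_neg (by omega)]

lemma altCore_bounds {cs : List Char} (h : altCore cs = true) :
    cs.length ≤ 3 ∧ digitLoop cs = true := by
  obtain ⟨m, hm, hcs⟩ := altCore_true h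
  have := digits256
  rw [List.all_eq_true] at this
  have hf := this m (by simpa [List.mem_range] using hm)
  simp only [Bool.and_eq_true, decide_eq_true_eq] at hf
  subst hcs
  exact ⟨hf.2, digitLoop_of_all hf.1⟩

-- exhaustive check of all digit strings of length 1, 2, 3
set_option maxRecDepth 4000 in
lemma enum3 : (pyDigits.all fun a => pyDigits.all fun b => pyDigits.all fun c =>
    (validIPv4PartCore [a, b, c] == altCore [a, b, c]) &&
    ((validIPv4PartCore [a, b] == altCore [a, b]) &&
     (validIPv4PartCore [a] == altCore [a]))) = true := by decide

lemma enum_get {a b c : Char} (ha : a ∈ pyDigits) (hb : b ∈ pyDigits) (hc : c ∈ pyDigits) :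
    validIPv4PartCore [a, b, c] = altCore [a, b, c] ∧
    validIPv4PartCore [a, b] = altCore [a, b] ∧
    validIPv4PartCore [a] = altCore [a] := by
  have h := enum3
  rw [List.all_eq_true] at h
  have h1 := h a ha
  rw [List.all_eq_true] at h1
  have h2 := h1 b hb
  rw [List.all_eq_true] at h2
  have h3 := h2 c hc
  simp only [Bool.and_eq_true, beq_iff_eq] at h3
  exact ⟨h3.1, h3.2.1, h3.2.2⟩

lemma core_eq (cs : List Char) : validIPv4PartCore cs = altCore cs := by
  by_cases hd : digitLoop cs = true
  · match cs with
    | [] => decide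
    | [a] =>
      obtain ⟨ha, -⟩ := digitLoop_cons hd
      have ha' : a ∈ pyDigits := by simpa using ha
      have h0 : ('0' : Char) ∈ pyDigits := by decide
      exact (enum_get ha' h0 h0).2.2
    | [a, b] =>
      obtain ⟨ha, hr⟩ := digitLoop_cons hd
      obtain ⟨hb, -⟩ := digitLoop_cons hr
      have ha' : a ∈ pyDigits := by simpa using ha
      have hb' : b ∈ pyDigits := by simpa using hb
      have h0 : ('0' : Char) ∈ pyDigits := by decide
      exact (enum_get ha' hb' h0).2.1
    | [a, b, c] =>
      obtain ⟨ha, hr⟩ := digitLoop_cons hd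
      obtain ⟨hb, hr2⟩ := digitLoop_cons hr
      obtain ⟨hc, -⟩ := digitLoop_cons hr2
      have ha' : a ∈ pyDigits := by simpa using ha
      have hb' : b ∈ pyDigits := by simpa using hb
      have hc' : c ∈ pyDigits := by simpa using hc
      exact (enum_get ha' hb' hc').1
    | a :: b :: c :: d :: rest =>
      -- length ≥ 4: A rejects by the length test, B because str(n) has at most 3 chars
      have hA : validIPv4PartCore (a :: b :: c :: d :: rest) = false := by
        unfold validIPv4PartCore
        rw [if_neg (by simp [hd]), if_pos (by left; simp only [List.length_cons]; omega)]
      rw [hA]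
      cases hb : altCore (a :: b :: c :: d :: rest) with
      | false => rfl
      | true =>
        exfalso
        have := (altCore_bounds hb).1
        simp only [List.length_cons] at this
        omega
  · -- some character is not a digit: A rejects in the loop, B's canonical comparison fails
    have hA : validIPv4PartCore cs = false := by
      unfold validIPv4PartCore
      rw [if_pos (by simpa using hd)]
    rw [hA]
    cases hb : altCore cs with
    | false => rfl
    | true => exact absurd (altCore_bounds hb).2 hd

-- ===== VERDICT (by name: the statement is the Claim_ definition above) =====
theorem validIPv4Part_spec : Claim_equal_validIPv4Part := by
  intro i _
  unfold Spec_validIPv4Part validIPv4Part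
  rw [alt_eq_altCore, core_eq]
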